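-- pv_equiv track=rewrite | github.com/s070808/EpubToAudiobook | epubaudio.py | split_paragraphs_by_heading_marker
-- ===== SOURCE A (Python) =====
-- SECTION_HEADER_MARKER = '#####START_HEADING#####'
--
-- def split_paragraphs_by_heading_marker(paragraphs):
--     """Split the list of paragraphs into chapters based on heading markers."""
--     chapters = []
--     current_chapter = []
--
--     for para in paragraphs:
--         if para.startswith(SECTION_HEADER_MARKER):
--             if current_chapter:
--                 chapters.append(current_chapter)
--             current_chapter = [para]
--         else:
--             current_chapter.append(para)
--
--     if current_chapter:
--         chapters.append(current_chapter)
--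
--     return chapters
-- ===== SOURCE B (Python) =====
-- SECTION_HEADER_MARKER = '#####START_HEADING#####'
--
-- def split_paragraphs_by_heading_marker(paragraphs):
--     """Split paragraphs into chapters by slicing at the marker positions."""
--     positions = [i for i, p in enumerate(paragraphs)
--                  if p.startswith(SECTION_HEADER_MARKER)]
--     if not positions:
--         return [paragraphs] if paragraphs else []
--     chapters = []
--     if positions[0] > 0:
--         chapters.append(paragraphs[:positions[0]])
--     bounds = positions + [len(paragraphs)]
--     for start, end in zip(bounds, bounds[1:]):
--         chapters.append(paragraphs[start:end])
--     return chapters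
-- ===== Notes on version B (the rewrite author's own statement) =====
-- stated objective: alternative
-- what changed: B first computes the list of marker indices and then builds every chapter by slicing between consecutive boundary indices, instead of A's single pass that grows a running current-chapter accumulator and flushes it at each marker and at the end.
import Mathlib
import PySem

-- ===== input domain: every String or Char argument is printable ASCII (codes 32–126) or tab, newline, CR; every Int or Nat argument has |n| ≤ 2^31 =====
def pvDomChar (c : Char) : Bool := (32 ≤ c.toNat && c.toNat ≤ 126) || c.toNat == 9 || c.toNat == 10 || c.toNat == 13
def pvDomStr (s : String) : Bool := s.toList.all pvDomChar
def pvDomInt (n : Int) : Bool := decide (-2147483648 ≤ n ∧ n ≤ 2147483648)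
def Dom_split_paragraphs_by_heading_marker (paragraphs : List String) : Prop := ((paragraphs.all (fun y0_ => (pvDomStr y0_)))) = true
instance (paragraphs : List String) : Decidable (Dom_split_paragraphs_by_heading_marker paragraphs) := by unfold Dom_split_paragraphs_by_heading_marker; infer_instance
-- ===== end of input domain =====

-- B builds the chapters by slicing between the precomputed marker indices instead of A's
-- running-accumulator-and-flush pass; same cost, different decomposition (objective: alternative).

def SECTION_HEADER_MARKER : String := "#####START_HEADING#####"

-- ===== PORT A =====
def split_paragraphs_by_heading_marker (paragraphs : List String) : List (List String) :=
  let st := paragraphs.foldl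
    (fun (st : List (List String) × List String) para =>
      if PySem.Str.startswith para SECTION_HEADER_MARKER then
        ((if st.2 = [] then st.1 else st.1 ++ [st.2]), [para])
      else
        (st.1, st.2 ++ [para]))
    ([], [])
  if st.2 = [] then st.1 else st.1 ++ [st.2]

-- ===== PORT B =====
def split_paragraphs_by_heading_marker_alt (paragraphs : List String) : List (List String) :=
  let positions := ((PySem.List.enumerate paragraphs).filter
      (fun ip => PySem.Str.startswith ip.2 SECTION_HEADER_MARKER)).map (fun ip => ip.1)
  match positions with
  | [] => if paragraphs ≠ [] then [paragraphs] else []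
  | q0 :: _ =>
    let lead := if q0 > 0 then [PySem.List.slice paragraphs none (some q0)] else []
    let bounds := positions ++ [(paragraphs.length : Int)]
    lead ++ ((bounds.zip (PySem.List.slice bounds (some 1) none)).map
      (fun se => PySem.List.slice paragraphs (some se.1) (some se.2)))

-- ===== PRECONDITION & SPEC =====
def Spec_split_paragraphs_by_heading_marker (paragraphs : List String) (out : List (List String)) : Prop := out = split_paragraphs_by_heading_marker_alt paragraphs
instance (paragraphs : List String) (out : List (List String)) : Decidable (Spec_split_paragraphs_by_heading_marker paragraphs out) := by unfold Spec_split_paragraphs_by_heading_marker; infer_instance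

-- ===== CLAIM (what is proved, stated in full; the proofs are below) =====
def Claim_equal_split_paragraphs_by_heading_marker : Prop := ∀ (paragraphs : List String), Dom_split_paragraphs_by_heading_marker paragraphs → Spec_split_paragraphs_by_heading_marker paragraphs (split_paragraphs_by_heading_marker paragraphs)

-- ===== LEMMAS AND PROOFS =====

-- marker test shared by the reasoning below
def pvM (p : String) : Bool := PySem.Str.startswith p SECTION_HEADER_MARKER

-- canonical recursive splitter: (leading run before the first marker, chapters from the first marker on)
def pvGo : List String → List String × List (List String)
  | [] => ([], [])
  | p :: t =>
    let r := pvGo t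
    if pvM p then ([], (p :: r.1) :: r.2) else (p :: r.1, r.2)

def pvFlush (r : List String × List (List String)) : List (List String) :=
  if r.1 = [] then r.2 else r.1 :: r.2

-- marker positions as naturals
def pvPos : List String → List Nat
  | [] => []
  | p :: t => (if pvM p then [0] else []) ++ (pvPos t).map (· + 1)

-- chapters obtained by slicing between consecutive boundary positions
def pvChap (ps : List String) : List (List String) :=
  ((pvPos ps ++ [ps.length]).zip ((pvPos ps).tail ++ [ps.length])).map
    (fun ab => (ps.drop ab.1).take (ab.2 - ab.1))

theorem pvGo_noMarker (ps : List String) (h : pvPos ps = []) : pvGo ps = (ps, []) := by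
  induction ps with
  | nil => rfl
  | cons p t ih =>
    simp only [pvPos] at h
    rcases List.append_eq_nil_iff.mp h with ⟨h1, h2⟩
    have hm : pvM p = false := by
      by_contra hc
      simp [Bool.not_eq_false] at hc
      simp [hc] at h1
    have ht : pvPos t = [] := by simpa using h2
    simp [pvGo, hm, ih ht]

theorem pvPos_ne_nil (ps : List String) (h : pvPos ps ≠ []) : ps ≠ [] := by
  intro hc; subst hc; exact h rfl

-- zip of two boundary lists shifted by one
theorem pvZipShift (p : String) (t : List String) (u v : List Nat) :
    (((u.map (· + 1)) ++ [t.length + 1]).zip ((v.map (· + 1)) ++ [t.length + 1])).map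
      (fun ab : Nat × Nat => ((p :: t).drop ab.1).take (ab.2 - ab.1))
    = ((u ++ [t.length]).zip (v ++ [t.length])).map
      (fun ab : Nat × Nat => (t.drop ab.1).take (ab.2 - ab.1)) := by
  have h1 : (u.map (· + 1)) ++ [t.length + 1] = (u ++ [t.length]).map (· + 1) := by simp
  have h2 : (v.map (· + 1)) ++ [t.length + 1] = (v ++ [t.length]).map (· + 1) := by simp
  rw [h1, h2, List.zip_map, List.map_map]
  apply List.map_congr_left
  intro ab _
  obtain ⟨a, b⟩ := ab
  simp only [Function.comp, Prod.map, List.drop_succ_cons, Nat.add_sub_add_right]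

theorem pvGo_pos (ps : List String) (h : pvPos ps ≠ []) :
    (pvGo ps).1 = ps.take ((pvPos ps).headD 0) ∧ (pvGo ps).2 = pvChap ps := by
  induction ps with
  | nil => simp [pvPos] at h
  | cons p t ih =>
    by_cases hm : pvM p = true
    case pos =>
      have hpos : pvPos (p :: t) = 0 :: (pvPos t).map (· + 1) := by simp [pvPos, hm]
      refine ⟨by simp [pvGo, hm, hpos], ?_⟩
      by_cases ht : pvPos t = []
      case pos =>
        have hgo := pvGo_noMarker t ht
        simp only [pvChap, hpos, ht, List.map_nil, List.nil_append, List.tail_cons]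
        simp [pvGo, hm, hgo]
      case neg =>
        rcases ih ht with ⟨ih1, ih2⟩
        obtain ⟨n0, ns, hnt⟩ := List.exists_cons_of_ne_nil ht
        have hchap : pvChap (p :: t) = (p :: t.take n0) :: pvChap t := by
          simp only [pvChap, hpos, hnt, List.tail_cons]
          rw [show ((0 :: List.map (· + 1) (n0 :: ns)) ++ [(p :: t).length])
                = 0 :: (List.map (· + 1) (n0 :: ns) ++ [(p :: t).length]) from rfl]
          rw [show (List.map (· + 1) (n0 :: ns) ++ [(p :: t).length])
                = (n0 + 1) :: (List.map (· + 1) ns ++ [(p :: t).length]) from by simp]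
          rw [List.zip_cons_cons, List.map_cons]
          congr 1
          rw [show ((n0 + 1) :: (List.map (· + 1) ns ++ [(p :: t).length]))
                = (List.map (· + 1) (n0 :: ns) ++ [t.length + 1]) from by simp]
          rw [show (List.map (· + 1) ns ++ [(p :: t).length])
                = (List.map (· + 1) ns ++ [t.length + 1]) from by simp]
          exact pvZipShift p t (n0 :: ns) ns
        rw [hchap]
        simp only [pvGo, hm, if_true]
        rw [ih1, ih2, hnt]
        simp
    case neg =>
      have hm' : pvM p = false := by simpa using hm
      have hpos : pvPos (p :: t) = (pvPos t).map (· + 1) := by simp [pvPos, hm']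
      have ht : pvPos t ≠ [] := by
        intro hc; rw [hpos, hc] at h; exact h rfl
      rcases ih ht with ⟨ih1, ih2⟩
      obtain ⟨n0, ns, hnt⟩ := List.exists_cons_of_ne_nil ht
      constructor
      · simp only [pvGo, hm']
        rw [ih1, hnt, hpos, hnt]
        simp
      · have hchap : pvChap (p :: t) = pvChap t := by
          simp only [pvChap, hpos, hnt]
          rw [show (List.map (· + 1) (n0 :: ns)).tail = List.map (· + 1) ns from by simp]
          rw [show (List.map (· + 1) (n0 :: ns) ++ [(p :: t).length])
                = (List.map (· + 1) (n0 :: ns) ++ [t.length + 1]) from by simp]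
          rw [show (List.map (· + 1) ns ++ [(p :: t).length])
                = (List.map (· + 1) ns ++ [t.length + 1]) from by simp]
          rw [pvZipShift p t (n0 :: ns) ns]
          simp
        rw [hchap, ← ih2]
        simp [pvGo, hm']

-- A's left fold with an arbitrary starting state, flushed, in terms of pvGo
theorem pvFoldA (ps : List String) :
    ∀ (chs : List (List String)) (cur : List String),
      (let st := ps.foldl
        (fun (st : List (List String) × List String) para =>
          if PySem.Str.startswith para SECTION_HEADER_MARKER then
            ((if st.2 = [] then st.1 else st.1 ++ [st.2]), [para])
          else
            (st.1, st.2 ++ [para])) (chs, cur)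
       if st.2 = [] then st.1 else st.1 ++ [st.2])
      = chs ++ (if cur ++ (pvGo ps).1 = [] then (pvGo ps).2
                else (cur ++ (pvGo ps).1) :: (pvGo ps).2) := by
  induction ps with
  | nil =>
    intro chs cur
    by_cases hc : cur = [] <;> simp [pvGo, hc]
  | cons p t ih =>
    intro chs cur
    by_cases hm : pvM p = true
    · have hs : PySem.Str.startswith p SECTION_HEADER_MARKER = true := hm
      simp only [List.foldl_cons, hs] at *
      rw [ih]
      by_cases hc : cur = [] <;>
        simp [pvGo, hm, hc, List.append_assoc]
    · have hs : PySem.Str.startswith p SECTION_HEADER_MARKER = false := by simpa using hm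
      simp only [List.foldl_cons, hs] at *
      rw [ih]
      simp [pvGo, hm, List.append_assoc]

theorem pvA_eq (ps : List String) :
    split_paragraphs_by_heading_marker ps = pvFlush (pvGo ps) := by
  have h := pvFoldA ps [] []
  simp only [List.nil_append] at h
  simpa [split_paragraphs_by_heading_marker, pvFlush] using h

-- B's position comprehension in terms of pvPos (shift by the enumeration start)
theorem pvEnum (ps : List String) : ∀ s : Int,
    ((PySem.List.enumerate ps s).filter
        (fun ip => PySem.Str.startswith ip.2 SECTION_HEADER_MARKER)).map (fun ip => ip.1)
    = (pvPos ps).map (fun n : Nat => s + (n : Int)) := by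
  induction ps with
  | nil => intro s; simp [PySem.List.enumerate_nil, pvPos]
  | cons p t ih =>
    intro s
    rw [PySem.List.enumerate_cons]
    by_cases hm : pvM p = true
    · have hs : PySem.Str.startswith p SECTION_HEADER_MARKER = true := hm
      have hpos : pvPos (p :: t) = 0 :: (pvPos t).map (· + 1) := by simp [pvPos, hm]
      rw [List.filter_cons_of_pos (by simpa using hs), List.map_cons, ih (s + 1),
          hpos, List.map_cons, List.map_map]
      congr 1
      · simp
      · apply List.map_congr_left
        intro n _
        simp only [Function.comp_apply]
        push_cast
        ring
    · have hs : PySem.Str.startswith p SECTION_HEADER_MARKER = false := by simpa using hm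
      have hpos : pvPos (p :: t) = (pvPos t).map (· + 1) := by simp [pvPos, hm]
      rw [List.filter_cons_of_neg (by simpa using hs), ih (s + 1), hpos, List.map_map]
      apply List.map_congr_left
      intro n _
      simp only [Function.comp_apply]
      push_cast
      ring

theorem pvB_eq (ps : List String) :
    split_paragraphs_by_heading_marker_alt ps = pvFlush (pvGo ps) := by
  have hE := pvEnum ps 0
  simp only [zero_add] at hE
  unfold split_paragraphs_by_heading_marker_alt
  rw [hE]
  cases hnp : pvPos ps with
  | nil =>
    have hgo := pvGo_noMarker ps hnp
    by_cases hps : ps = [] <;> simp [pvGo, hgo, pvFlush, hps]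
  | cons q0 qs =>
    have hne : pvPos ps ≠ [] := by rw [hnp]; simp
    rcases pvGo_pos ps hne with ⟨h1, h2⟩
    have hpsne : ps ≠ [] := pvPos_ne_nil ps hne
    simp only [List.map_cons]
    have hlead : (if ((q0 : Int)) > 0 then [PySem.List.slice ps none (some (q0 : Int))] else [])
        = (if 0 < q0 then [ps.take q0] else []) := by
      rw [PySem.List.slice_to_natCast]
      by_cases h0 : 0 < q0
      · rw [if_pos (by exact_mod_cast h0), if_pos h0]
      · rw [if_neg (by exact_mod_cast h0), if_neg h0]
    have hb : (((q0 : Int) :: qs.map (fun n : Nat => (n : Int))) ++ [(ps.length : Int)])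
        = ((q0 :: qs) ++ [ps.length]).map (fun n : Nat => (n : Int)) := by simp
    have htail : PySem.List.slice (((q0 :: qs) ++ [ps.length]).map (fun n : Nat => (n : Int))) (some 1) none
        = (qs ++ [ps.length]).map (fun n : Nat => (n : Int)) := by
      rw [PySem.List.slice_from_one, List.cons_append, List.map_cons, List.tail_cons]
    have hzs : ((((q0 :: qs) ++ [ps.length]).map (fun n : Nat => (n : Int))).zip
          ((qs ++ [ps.length]).map (fun n : Nat => (n : Int)))).map
          (fun se => PySem.List.slice ps (some se.1) (some se.2))
        = (((q0 :: qs) ++ [ps.length]).zip (qs ++ [ps.length])).map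
          (fun ab : Nat × Nat => (ps.drop ab.1).take (ab.2 - ab.1)) := by
      rw [List.zip_map, List.map_map]
      apply List.map_congr_left
      intro ab _
      obtain ⟨a, b⟩ := ab
      simp only [Function.comp_apply, Prod.map]
      exact PySem.List.slice_natCast ps a b
    have hchap : (((q0 :: qs) ++ [ps.length]).zip (qs ++ [ps.length])).map
          (fun ab : Nat × Nat => (ps.drop ab.1).take (ab.2 - ab.1)) = pvChap ps := by
      simp [pvChap, hnp]
    rw [hb, htail, hzs, hchap, hlead]
    rw [pvFlush, h1, hnp]
    simp only [List.headD_cons]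
    by_cases h0 : 0 < q0
    · have hne2 : ps.take q0 ≠ [] := by
        simp only [ne_eq, List.take_eq_nil_iff, not_or]
        exact ⟨by omega, hpsne⟩
      rw [if_pos h0, if_neg hne2, h2]
      simp
    · have hq0 : q0 = 0 := by omega
      rw [if_neg h0, hq0]
      simp [h2]

-- ===== VERDICT (by name: the statement is the Claim_ definition above) =====
theorem split_paragraphs_by_heading_marker_spec : Claim_equal_split_paragraphs_by_heading_marker := by
  intro ps _
  unfold Spec_split_paragraphs_by_heading_marker
  rw [pvA_eq, pvB_eq]
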